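-- pv_equiv track=rewrite | github.com/JaeEon-Ryu/Coding_test | Codility/Lessons/Lessons_10/Peaks.py | solution
-- ===== SOURCE A (Python) =====
-- def solution(A):
--     # write your code in Python 3.6
--     peaks = []
--     len_A = len(A)
--
--     # peak들 구하기
--     for i in range(1, len_A - 1):
--         if A[i - 1] < A[i] > A[i + 1]:
--             peaks.append(i)
--
--     # block 개수를 구하고 block 슬라이스
--     for i in range(len(peaks), 0, -1):
--         if len_A % i == 0:
--             len_block = len_A // i
--             block = [False for _ in range(i)]
--             cnt = 0
--
--             # peak가 어디에 포함되는지 계산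
--             for j in range(len(peaks)):
--                 idx = peaks[j] // len_block
--                 if block[idx] == False:
--                     block[idx] = True
--                     cnt += 1
--
--             if cnt == i:
--                 return cnt
--
--     return 0
-- ===== SOURCE B (Python) =====
-- def solution(A):
--     n = len(A)
--     # prefix[k] = number of peaks with index < k
--     prefix = [0]
--     for i in range(n):
--         is_peak = 1 if 0 < i < n - 1 and A[i - 1] < A[i] > A[i + 1] else 0
--         prefix.append(prefix[-1] + is_peak)
--     total = prefix[n]
--     for blocks in range(total, 0, -1):
--         if n % blocks == 0:
--             size = n // blocks
--             if all(prefix[(b + 1) * size] - prefix[b * size] > 0 for b in range(blocks)):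
--                 return blocks
--     return 0
-- ===== Notes on version B (the rewrite author's own statement) =====
-- stated objective: alternative
-- what changed: B replaces A's per-divisor block-marking pass over all peaks (a boolean block array rebuilt and refilled for every divisor) by a prefix-count array of peaks built once, checking each candidate divisor in O(#blocks) via prefix differences with early exit.
import Mathlib
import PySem

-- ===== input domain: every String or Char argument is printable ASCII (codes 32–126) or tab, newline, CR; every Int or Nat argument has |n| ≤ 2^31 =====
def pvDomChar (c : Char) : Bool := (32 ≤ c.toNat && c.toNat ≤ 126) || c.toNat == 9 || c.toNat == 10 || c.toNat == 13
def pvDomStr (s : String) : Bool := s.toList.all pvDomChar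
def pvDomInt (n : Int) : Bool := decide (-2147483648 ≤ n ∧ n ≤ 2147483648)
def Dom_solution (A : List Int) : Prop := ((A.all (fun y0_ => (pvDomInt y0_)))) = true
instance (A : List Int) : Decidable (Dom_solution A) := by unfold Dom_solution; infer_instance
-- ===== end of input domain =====

-- B replaces A's per-divisor O(#peaks) block-marking pass by a prefix-count array of peaks
-- consulted in O(#blocks) per divisor (objective: alternative algorithm for the block check).

-- ===== PORT A =====
-- All list indices A reaches are provably in range (peak indices lie in [1, n-2],
-- block indices in [0, i)), so pyGetD/pySetD with those indices are exact.
def solution (A : List Int) : Int :=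
  let lenA : Int := (A.length : Int)
  let peaks : List Int := (PySem.List.pyRange 1 (lenA - 1) 1).foldl
    (fun ps i =>
      if PySem.List.pyGetD A (i - 1) 0 < PySem.List.pyGetD A i 0 ∧
         PySem.List.pyGetD A (i + 1) 0 < PySem.List.pyGetD A i 0
      then ps ++ [i] else ps) []
  let res : Option Int := (PySem.List.pyRange (peaks.length : Int) 0 (-1)).foldl
    (fun acc i =>
      match acc with
      | some r => some r
      | none =>
        if PySem.Int.mod lenA i = 0 then
          let lenBlock := PySem.Int.floordiv lenA i
          let st : List Bool × Int := (PySem.List.pyRange 0 (peaks.length : Int) 1).foldl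
            (fun (s : List Bool × Int) j =>
              let idx := PySem.Int.floordiv (PySem.List.pyGetD peaks j 0) lenBlock
              if PySem.List.pyGetD s.1 idx false = false then
                (PySem.List.pySetD s.1 idx true, s.2 + 1)
              else s)
            (List.replicate i.toNat false, 0)
          if st.2 = i then some st.2 else none
        else none) none
  res.getD 0

-- ===== PORT B =====
def solution_alt (A : List Int) : Int :=
  let n : Int := (A.length : Int)
  let pre : List Int := (PySem.List.pyRange 0 n 1).foldl
    (fun pre i =>
      let isPeak : Int :=
        if 0 < i ∧ i < n - 1 ∧
           PySem.List.pyGetD A (i - 1) 0 < PySem.List.pyGetD A i 0 ∧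
           PySem.List.pyGetD A (i + 1) 0 < PySem.List.pyGetD A i 0
        then 1 else 0
      pre ++ [PySem.List.pyGetD pre (-1) 0 + isPeak]) [(0 : Int)]
  let total : Int := PySem.List.pyGetD pre n 0
  let res : Option Int := (PySem.List.pyRange total 0 (-1)).foldl
    (fun acc blocks =>
      match acc with
      | some r => some r
      | none =>
        if PySem.Int.mod n blocks = 0 then
          let size := PySem.Int.floordiv n blocks
          if (PySem.List.pyRange 0 blocks 1).all
              (fun b => PySem.List.pyGetD pre ((b + 1) * size) 0
                        - PySem.List.pyGetD pre (b * size) 0 > 0)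
          then some blocks else none
        else none) none
  res.getD 0

-- ===== PRECONDITION & SPEC =====
def Spec_solution (A : List Int) (out : Int) : Prop := out = solution_alt A
instance (A : List Int) (out : Int) : Decidable (Spec_solution A out) := by unfold Spec_solution; infer_instance

-- ===== CLAIM (what is proved, stated in full; the proofs are below) =====
def Claim_equal_solution : Prop := ∀ (A : List Int), Dom_solution A → Spec_solution A (solution A)

-- ===== LEMMAS AND PROOFS =====

def pvCondB (A : List Int) (i : Int) : Bool :=
  decide (PySem.List.pyGetD A (i - 1) 0 < PySem.List.pyGetD A i 0 ∧
          PySem.List.pyGetD A (i + 1) 0 < PySem.List.pyGetD A i 0)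
def pvPeaks (A : List Int) : List Int :=
  (PySem.List.pyRange 1 ((A.length : Int) - 1)).filter (pvCondB A)
def pvHit (l : List Int) (s : Int) (b : Int) : Bool :=
  l.any (fun p => PySem.Int.floordiv p s == b)

lemma pvPeaks_fold (A : List Int) :
    (PySem.List.pyRange 1 ((A.length : Int) - 1)).foldl
      (fun ps i =>
        if PySem.List.pyGetD A (i - 1) 0 < PySem.List.pyGetD A i 0 ∧
           PySem.List.pyGetD A (i + 1) 0 < PySem.List.pyGetD A i 0
        then ps ++ [i] else ps) [] = pvPeaks A := by
  rw [PySem.List.foldl_append_ite_eq_filter]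
  simp only [pvPeaks]
  apply List.filter_congr
  intro x _
  simp [pvCondB]

lemma pvPeaks_mem (A : List Int) (p : Int) (hp : p ∈ pvPeaks A) :
    1 ≤ p ∧ p < (A.length : Int) - 1 := by
  have := (List.mem_filter.mp hp).1
  exact PySem.List.mem_pyRange_one.mp this

lemma pvCountP_window (l : List Int) (k1 k2 : Int) (h : k1 ≤ k2) :
    l.countP (fun p => decide (p < k2)) =
      l.countP (fun p => decide (p < k1)) + l.countP (fun p => decide (k1 ≤ p ∧ p < k2)) := by
  induction l with
  | nil => simp
  | cons a t ih =>
    simp only [List.countP_cons, ih]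
    by_cases h1 : a < k1 <;> by_cases h2 : a < k2 <;> by_cases h3 : k1 ≤ a <;> simp [h1, h2, h3] <;> omega

lemma pvHit_append (l : List Int) (p s b : Int) :
    pvHit (l ++ [p]) s b = (pvHit l s b || (PySem.Int.floordiv p s == b)) := by
  simp [pvHit]

lemma pvCnt_step (i k : Nat) (hk : k < i) (g : Nat → Bool) (hgk : g k = false) :
    ((List.range i).countP (fun b => g b || b == k)) = (List.range i).countP g + 1 := by
  induction i with
  | zero => omega
  | succ j ih =>
    rw [List.range_succ, List.countP_append, List.countP_append]
    rcases Nat.lt_or_ge k j with h | h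
    · rw [ih h]
      have : j ≠ k := by omega
      simp [this]
      omega
    · have hkj : k = j := by omega
      subst hkj
      have : (List.range k).countP (fun b => g b || b == k) = (List.range k).countP g := by
        apply List.countP_congr
        intro b hb
        have : b < k := List.mem_range.mp hb
        simp [Nat.ne_of_lt this]
      rw [this]
      simp [hgk]
def pvC (A : List Int) (k : Int) : Int :=
  ((pvPeaks A).countP (fun p => decide (p < k)) : Nat)

lemma pvC_succ (A : List Int) (i : Int) :
    pvC A (i + 1) = pvC A i + (if (0 < i ∧ i < (A.length : Int) - 1 ∧ pvCondB A i = true) then 1 else 0) := by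
  have hw := pvCountP_window (pvPeaks A) i (i + 1) (by omega)
  have hcongr : (pvPeaks A).countP (fun p => decide (i ≤ p ∧ p < i + 1)) = (pvPeaks A).count i := by
    rw [List.count]
    apply List.countP_congr
    intro p _
    constructor <;> intro h
    · simp at h ⊢; omega
    · simp at h ⊢; omega
  have hnd : (pvPeaks A).Nodup := List.Nodup.filter _ (PySem.List.nodup_pyRange_one 1 _)
  have hcount : (pvPeaks A).count i = if i ∈ pvPeaks A then 1 else 0 := by
    split
    · exact List.count_eq_one_of_mem hnd ‹_›
    · exact List.count_eq_zero_of_not_mem ‹_›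
  have hmem : i ∈ pvPeaks A ↔ (0 < i ∧ i < (A.length : Int) - 1 ∧ pvCondB A i = true) := by
    simp only [pvPeaks, List.mem_filter, PySem.List.mem_pyRange_one]
    constructor
    · rintro ⟨⟨h1, h2⟩, h3⟩; exact ⟨by omega, h2, h3⟩
    · rintro ⟨h1, h2, h3⟩; exact ⟨⟨by omega, h2⟩, h3⟩
  simp only [pvC]
  rw [hw, hcongr, hcount]
  by_cases hm : i ∈ pvPeaks A
  · simp [hm, hmem.mp hm]
  · have := hmem.not.mp hm
    simp [hm, this]
lemma pvC_total (A : List Int) :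
    pvC A (A.length : Int) = ((pvPeaks A).length : Int) := by
  simp only [pvC]
  norm_cast
  rw [List.countP_eq_length]
  intro p hp
  have := pvPeaks_mem A p hp
  simp; omega

lemma pvC_zero (A : List Int) : pvC A 0 = 0 := by
  simp only [pvC]
  norm_cast
  rw [List.countP_eq_zero]
  intro p hp
  have := pvPeaks_mem A p hp
  simp; omega

lemma pvPrefix_fold (A : List Int) (m : Nat) (hm : (m : Int) ≤ (A.length : Int)) :
    (PySem.List.pyRange 0 (m : Int)).foldl
      (fun pre i =>
        pre ++ [PySem.List.pyGetD pre (-1) 0 +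
          (if 0 < i ∧ i < (A.length : Int) - 1 ∧
              PySem.List.pyGetD A (i - 1) 0 < PySem.List.pyGetD A i 0 ∧
              PySem.List.pyGetD A (i + 1) 0 < PySem.List.pyGetD A i 0
           then (1 : Int) else 0)]) [(0 : Int)] =
    (PySem.List.pyRange 0 ((m : Int) + 1)).map (pvC A) := by
  induction m with
  | zero =>
    rw [PySem.List.pyRange_one_eq_nil (by omega)]
    rw [show ((0:Nat):Int) + 1 = (0:Int) + 1 by norm_num, PySem.List.pyRange_one_singleton]
    simp [pvC_zero]
  | succ m ih =>
    have hm' : (m : Int) ≤ (A.length : Int) := by push_cast at hm ⊢; omega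
    rw [show ((m + 1 : Nat) : Int) = (m : Int) + 1 by push_cast; ring]
    rw [PySem.List.pyRange_one_succ_right (by omega : (0:Int) ≤ (m:Int)),
        PySem.List.pyRange_one_succ_right (by omega : (0:Int) ≤ (m:Int) + 1)]
    rw [List.foldl_append, ih hm']
    rw [List.map_append]
    rw [PySem.List.pyRange_one_succ_right (by omega : (0:Int) ≤ (m:Int)), List.map_append]
    simp only [List.foldl_cons, List.foldl_nil, List.map_cons, List.map_nil,
      PySem.List.pyGetD_neg_one_append_singleton]
    congr 1
    rw [pvC_succ A (m : Int)]
    simp only [pvCondB]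
    congr 2
    simp
def pvBlk (i : Nat) (l : List Int) (s : Int) : List Bool :=
  (List.range i).map (fun b : Nat => pvHit l s (b : Int))

def pvCnt (i : Nat) (l : List Int) (s : Int) : Int :=
  ((List.range i).countP (fun b : Nat => pvHit l s (b : Int)) : Nat)

lemma pvBlk_get (i : Nat) (l0 : List Int) (s idx : Int) (h0 : 0 ≤ idx) (hi : idx < (i : Int)) :
    PySem.List.pyGetD (pvBlk i l0 s) idx false = pvHit l0 s idx := by
  rw [PySem.List.pyGetD_eq_getElem _ _ h0 (by simp only [pvBlk, List.length_map, List.length_range]; omega)]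
  simp only [pvBlk, List.getElem_map, List.getElem_range]
  rw [Int.toNat_of_nonneg h0]

lemma pvBlk_append (i : Nat) (l0 : List Int) (p s : Int)
    (h0 : 0 ≤ PySem.Int.floordiv p s) (_hi : PySem.Int.floordiv p s < (i : Int)) :
    pvBlk i (l0 ++ [p]) s = (pvBlk i l0 s).set (PySem.Int.floordiv p s).toNat true := by
  apply List.ext_getElem
  · simp only [pvBlk, List.length_set, List.length_map, List.length_range]
  · intro j hj1 hj2
    rw [List.getElem_set]
    simp only [pvBlk, List.length_map, List.length_range] at hj1
    simp only [pvBlk, List.getElem_map, List.getElem_range]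
    rw [pvHit_append]
    by_cases hji : (PySem.Int.floordiv p s).toNat = j
    · rw [if_pos hji]
      have : (PySem.Int.floordiv p s == ((j : Nat) : Int)) = true := by simp; omega
      rw [this, Bool.or_true]
    · rw [if_neg hji]
      have : (PySem.Int.floordiv p s == ((j : Nat) : Int)) = false := by simp; omega
      rw [this, Bool.or_false]

lemma pvCnt_append_hit (i : Nat) (l0 : List Int) (p s : Int)
    (hhit : pvHit l0 s (PySem.Int.floordiv p s) = true) :
    pvCnt i (l0 ++ [p]) s = pvCnt i l0 s := by
  simp only [pvCnt]
  congr 1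
  apply List.countP_congr
  intro b _
  rw [pvHit_append]
  constructor <;> intro h
  · rcases Bool.or_eq_true_iff.mp h with h | h
    · exact h
    · have : PySem.Int.floordiv p s = (b : Int) := by simpa using h
      rw [← this]; exact hhit
  · rw [h]; simp

lemma pvBlk_set_hit (i : Nat) (l0 : List Int) (p s : Int)
    (h0 : 0 ≤ PySem.Int.floordiv p s)
    (hhit : pvHit l0 s (PySem.Int.floordiv p s) = true) :
    (pvBlk i l0 s).set (PySem.Int.floordiv p s).toNat true = pvBlk i l0 s := by
  apply List.ext_getElem
  · simp
  · intro j hj1 hj2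
    rw [List.getElem_set]
    by_cases hji : (PySem.Int.floordiv p s).toNat = j
    · rw [if_pos hji]
      simp only [pvBlk, List.length_map, List.length_range] at hj2
      simp only [pvBlk, List.getElem_map, List.getElem_range]
      rw [← hji, Int.toNat_of_nonneg h0, hhit]
    · rw [if_neg hji]

lemma pvCnt_append_new (i : Nat) (l0 : List Int) (p s : Int)
    (h0 : 0 ≤ PySem.Int.floordiv p s) (hi : PySem.Int.floordiv p s < (i : Int))
    (hhit : pvHit l0 s (PySem.Int.floordiv p s) = false) :
    pvCnt i (l0 ++ [p]) s = pvCnt i l0 s + 1 := by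
  simp only [pvCnt]
  have hstep := pvCnt_step i (PySem.Int.floordiv p s).toNat (by omega)
    (fun b : Nat => pvHit l0 s (b : Int))
    (by show pvHit l0 s (((PySem.Int.floordiv p s).toNat : Nat) : Int) = false
        rw [Int.toNat_of_nonneg h0]; exact hhit)
  have hcg : (List.range i).countP (fun b : Nat => pvHit (l0 ++ [p]) s (b : Int)) =
      (List.range i).countP (fun b : Nat => pvHit l0 s (b : Int) || b == (PySem.Int.floordiv p s).toNat) := by
    apply List.countP_congr
    intro b _
    rw [pvHit_append]
    constructor <;> intro h <;> rcases Bool.or_eq_true_iff.mp h with h | h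
    · rw [h]; simp
    · have hb : b = (PySem.Int.floordiv p s).toNat := by simp at h; omega
      simp [hb]
    · rw [h]; simp
    · have hb : (PySem.Int.floordiv p s == ((b : Nat) : Int)) = true := by simp at h ⊢; omega
      rw [hb]; simp
  rw [hcg, hstep]
  push_cast; ring

lemma pvInner_fold (s : Int) (hs : 0 < s) (i : Nat) (l : List Int)
    (hl : ∀ p ∈ l, 0 ≤ p ∧ PySem.Int.floordiv p s < (i : Int)) (l0 : List Int) :
    l.foldl
      (fun (st : List Bool × Int) p =>
        let idx := PySem.Int.floordiv p s
        if PySem.List.pyGetD st.1 idx false = false then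
          (PySem.List.pySetD st.1 idx true, st.2 + 1)
        else st)
      (pvBlk i l0 s, pvCnt i l0 s) = (pvBlk i (l0 ++ l) s, pvCnt i (l0 ++ l) s) := by
  induction l generalizing l0 with
  | nil => simp
  | cons p t ih =>
    have hp := hl p (by simp)
    have hidx0 : 0 ≤ PySem.Int.floordiv p s := by
      rw [PySem.Int.le_floordiv_iff_mul_le hs]; omega
    have hidxi : PySem.Int.floordiv p s < (i : Int) := hp.2
    have hget := pvBlk_get i l0 s (PySem.Int.floordiv p s) hidx0 hidxi
    rw [List.foldl_cons]
    have hrest := ih (fun q hq => hl q (by simp [hq])) (l0 ++ [p])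
    by_cases hhit : pvHit l0 s (PySem.Int.floordiv p s) = true
    · rw [show (l0 ++ [p]) ++ t = l0 ++ p :: t by simp] at hrest
      rw [← hrest]
      congr 1
      show (if PySem.List.pyGetD (pvBlk i l0 s) (PySem.Int.floordiv p s) false = false then
          (PySem.List.pySetD (pvBlk i l0 s) (PySem.Int.floordiv p s) true, pvCnt i l0 s + 1)
        else (pvBlk i l0 s, pvCnt i l0 s)) = (pvBlk i (l0 ++ [p]) s, pvCnt i (l0 ++ [p]) s)
      rw [hget, hhit]
      rw [if_neg (by simp)]
      rw [pvBlk_append i l0 p s hidx0 hidxi, pvBlk_set_hit i l0 p s hidx0 hhit,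
          pvCnt_append_hit i l0 p s hhit]
    · have hhit' : pvHit l0 s (PySem.Int.floordiv p s) = false := by simpa using hhit
      rw [show (l0 ++ [p]) ++ t = l0 ++ p :: t by simp] at hrest
      rw [← hrest]
      congr 1
      show (if PySem.List.pyGetD (pvBlk i l0 s) (PySem.Int.floordiv p s) false = false then
          (PySem.List.pySetD (pvBlk i l0 s) (PySem.Int.floordiv p s) true, pvCnt i l0 s + 1)
        else (pvBlk i l0 s, pvCnt i l0 s)) = (pvBlk i (l0 ++ [p]) s, pvCnt i (l0 ++ [p]) s)
      rw [hget, hhit']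
      rw [if_pos rfl]
      rw [PySem.List.pySetD_of_nonneg _ _ hidx0]
      rw [pvBlk_append i l0 p s hidx0 hidxi, pvCnt_append_new i l0 p s hidx0 hidxi hhit']
lemma pvC_diff_pos (A : List Int) (s b : Int) (hs : 0 < s) :
    (0 < pvC A ((b + 1) * s) - pvC A (b * s)) ↔ pvHit (pvPeaks A) s b = true := by
  have hw := pvCountP_window (pvPeaks A) (b * s) ((b + 1) * s) (by nlinarith)
  have : pvC A ((b + 1) * s) - pvC A (b * s) =
      ((pvPeaks A).countP (fun p => decide (b * s ≤ p ∧ p < (b + 1) * s)) : Nat) := by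
    simp only [pvC]
    rw [hw]; push_cast; ring
  rw [this]
  constructor
  · intro h
    have hpos : 0 < (pvPeaks A).countP (fun p => decide (b * s ≤ p ∧ p < (b + 1) * s)) := by
      exact_mod_cast h
    obtain ⟨p, hp, hpred⟩ := List.countP_pos_iff.mp hpos
    simp only [decide_eq_true_eq] at hpred
    simp only [pvHit, List.any_eq_true]
    exact ⟨p, hp, by simp [(PySem.Int.floordiv_eq_iff_of_pos hs).mpr hpred]⟩
  · intro h
    simp only [pvHit, List.any_eq_true] at h
    obtain ⟨p, hp, hpred⟩ := h
    have : PySem.Int.floordiv p s = b := by simpa using hpred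
    have hb := (PySem.Int.floordiv_eq_iff_of_pos hs).mp this
    have hpos : 0 < (pvPeaks A).countP (fun p => decide (b * s ≤ p ∧ p < (b + 1) * s)) :=
      List.countP_pos_iff.mpr ⟨p, hp, by simp [hb.1, hb.2]⟩
    exact_mod_cast hpos

lemma pvBlk_nil (i : Nat) (s : Int) : pvBlk i [] s = List.replicate i false := by
  have hlen : (pvBlk i [] s).length = i := by simp [pvBlk]
  have h := List.eq_replicate_of_mem (a := false) (l := pvBlk i [] s) ?_
  · rw [hlen] at h; exact h
  · intro b hb
    simp only [pvBlk, List.mem_map] at hb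
    obtain ⟨x, _, hx⟩ := hb
    simp [pvHit] at hx
    omega

lemma pvCnt_nil (i : Nat) (s : Int) : pvCnt i [] s = 0 := by
  simp [pvCnt, pvHit]

lemma pvPeaks_len_le (A : List Int) :
    ((pvPeaks A).length : Int) ≤ ((A.length : Int) - 1 - 1).toNat := by
  have := List.length_filter_le (pvCondB A) (PySem.List.pyRange 1 ((A.length : Int) - 1))
  have hl := PySem.List.length_pyRange_one 1 ((A.length : Int) - 1)
  simp only [pvPeaks]
  omega
-- block indices in [0, i)), so pyGetD/pySetD with those indices are exact.
lemma pvCheck_iff (A : List Int) (i s : Int)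
    (h1 : 1 ≤ i)
    (hs : 0 < s) (hsi : s * i = (A.length : Int)) :
    (pvCnt i.toNat (pvPeaks A) s = i) ↔
    ((PySem.List.pyRange 0 i).all (fun b =>
       decide (PySem.List.pyGetD ((PySem.List.pyRange 0 ((A.length : Int) + 1)).map (pvC A)) ((b + 1) * s) 0
         - PySem.List.pyGetD ((PySem.List.pyRange 0 ((A.length : Int) + 1)).map (pvC A)) (b * s) 0 > 0)) = true) := by
  set n : Int := (A.length : Int) with hn
  have hcnt : (pvCnt i.toNat (pvPeaks A) s = i) ↔
      ∀ b ∈ List.range i.toNat, pvHit (pvPeaks A) s (b : Int) = true := by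
    simp only [pvCnt]
    rw [show ((((List.range i.toNat).countP (fun b : Nat => pvHit (pvPeaks A) s (b : Int)) : Nat)) : Int) = i
        ↔ (List.range i.toNat).countP (fun b : Nat => pvHit (pvPeaks A) s (b : Int)) = i.toNat by omega]
    have h2 := List.countP_eq_length (l := List.range i.toNat)
      (p := fun b : Nat => pvHit (pvPeaks A) s (b : Int))
    rw [List.length_range] at h2
    exact h2
  rw [hcnt, List.all_eq_true]
  constructor
  · intro h b hb
    have hbm := PySem.List.mem_pyRange_one.mp hb
    have hb0 : 0 ≤ b := hbm.1
    have hbi : b < i := hbm.2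
    have hhit := h b.toNat (by rw [List.mem_range]; omega)
    rw [Int.toNat_of_nonneg hb0] at hhit
    have hget1 : PySem.List.pyGetD ((PySem.List.pyRange 0 (n + 1)).map (pvC A)) ((b + 1) * s) 0 = pvC A ((b + 1) * s) := by
      apply PySem.List.pyGetD_map_pyRange_of_nonneg <;> nlinarith
    have hget2 : PySem.List.pyGetD ((PySem.List.pyRange 0 (n + 1)).map (pvC A)) (b * s) 0 = pvC A (b * s) := by
      apply PySem.List.pyGetD_map_pyRange_of_nonneg <;> nlinarith
    rw [hget1, hget2]
    simp only [decide_eq_true_eq]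
    have := (pvC_diff_pos A s b hs).mpr hhit
    omega
  · intro h b hb
    have hbr := List.mem_range.mp hb
    have hbm : (b : Int) ∈ PySem.List.pyRange 0 i := by
      rw [PySem.List.mem_pyRange_one]; omega
    have := h (b : Int) hbm
    have hget1 : PySem.List.pyGetD ((PySem.List.pyRange 0 (n + 1)).map (pvC A)) (((b : Int) + 1) * s) 0 = pvC A (((b : Int) + 1) * s) := by
      apply PySem.List.pyGetD_map_pyRange_of_nonneg <;> nlinarith [Int.toNat_of_nonneg (by omega : (0:Int) ≤ i), (by omega : ((b : Nat) : Int) < i)]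
    have hget2 : PySem.List.pyGetD ((PySem.List.pyRange 0 (n + 1)).map (pvC A)) ((b : Int) * s) 0 = pvC A ((b : Int) * s) := by
      apply PySem.List.pyGetD_map_pyRange_of_nonneg <;> nlinarith [(by omega : ((b : Nat) : Int) < i)]
    rw [hget1, hget2, decide_eq_true_eq] at this
    exact (pvC_diff_pos A s (b : Int) hs).mp (by omega)

lemma pvInner_fold' (s : Int) (hs : 0 < s) (i : Nat) (peaks : List Int)
    (hl : ∀ p ∈ peaks, 0 ≤ p ∧ PySem.Int.floordiv p s < (i : Int)) :
    (PySem.List.pyRange 0 (PySem.List.len peaks)).foldl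
      (fun (st : List Bool × Int) j =>
        if PySem.List.pyGetD st.1 (PySem.Int.floordiv (PySem.List.pyGetD peaks j 0) s) false = false then
          (PySem.List.pySetD st.1 (PySem.Int.floordiv (PySem.List.pyGetD peaks j 0) s) true, st.2 + 1)
        else st)
      (List.replicate i false, 0) = (pvBlk i peaks s, pvCnt i peaks s) := by
  have h := PySem.List.foldl_pyRange_pyGetD peaks (0 : Int)
    (fun (st : List Bool × Int) p =>
      if PySem.List.pyGetD st.1 (PySem.Int.floordiv p s) false = false then
        (PySem.List.pySetD st.1 (PySem.Int.floordiv p s) true, st.2 + 1)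
      else st)
    (List.replicate i false, (0 : Int)) (le_refl 0)
  beta_reduce at h
  rw [show (0 : Int).toNat = 0 from rfl, List.drop_zero] at h
  rw [h]
  have hinit : (List.replicate i false, (0 : Int)) = (pvBlk i [] s, pvCnt i [] s) := by
    rw [pvBlk_nil, pvCnt_nil]
  rw [hinit, pvInner_fold s hs i peaks hl []]
  simp only [List.nil_append]

lemma pvMain_eq (A : List Int) : solution A = solution_alt A := by
  simp only [solution, solution_alt]
  rw [pvPeaks_fold]
  rw [pvPrefix_fold A A.length (le_refl _)]
  rw [PySem.List.pyGetD_map_pyRange_of_nonneg (pvC A) _ _ 0 (by omega) (by omega)]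
  rw [pvC_total]
  apply congrArg (fun o : Option Int => o.getD 0)
  apply PySem.List.foldl_congr_mem
  intro acc x hx
  have hxm := PySem.List.mem_pyRange_neg_one.mp hx
  have hx1 : 1 ≤ x := by omega
  cases acc with
  | some r => rfl
  | none =>
    simp only []
    by_cases hmod : PySem.Int.mod (A.length : Int) x = 0
    · rw [if_pos hmod, if_pos hmod]
      have hPle := pvPeaks_len_le A
      have hnx : x + 2 ≤ (A.length : Int) := by omega
      set s : Int := PySem.Int.floordiv (A.length : Int) x with hsdef
      have hsx : s * x = (A.length : Int) := by
        have := PySem.Int.floordiv_mul_add_mod (A.length : Int) x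
        rw [hmod] at this
        rw [← hsdef] at this
        omega
      have hs : 0 < s := by
        have h1 : (1 : Int) ≤ s := by
          rw [hsdef, PySem.Int.le_floordiv_iff_mul_le (by omega)]; omega
        omega
      have hxt : ((x.toNat : Nat) : Int) = x := by omega
      have hl : ∀ p ∈ pvPeaks A, 0 ≤ p ∧ PySem.Int.floordiv p s < ((x.toNat : Nat) : Int) := by
        intro p hp
        have hm := pvPeaks_mem A p hp
        constructor
        · omega
        · rw [hxt, PySem.Int.floordiv_lt_iff_lt_mul hs]
          nlinarith
      rw [show ((pvPeaks A).length : Int) = PySem.List.len (pvPeaks A) from rfl]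
      rw [pvInner_fold' s hs x.toNat (pvPeaks A) hl]
      have hchk := pvCheck_iff A x s hx1 hs hsx
      by_cases hc : pvCnt x.toNat (pvPeaks A) s = x
      · rw [if_pos hc, if_pos (hchk.mp hc), hc]
      · rw [if_neg hc, if_neg (fun h => hc (hchk.mpr h))]
    · rw [if_neg hmod, if_neg hmod]

-- ===== VERDICT (by name: the statement is the Claim_ definition above) =====
theorem solution_spec : Claim_equal_solution := by
  intro A _
  exact pvMain_eq A
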